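-- pv_equiv track=rewrite | github.com/Kaleidophon/tipsy-tapir | homework2.py | create_document_id_to_repr_map
-- ===== SOURCE A (Python) =====
-- def create_document_id_to_repr_map(document_ids):
--     """
--     Compensate for empty documents in document collections.
--     Because of using hd5 storage, we can only store vectors of the same length, so no zero-length vectors for empty
--     documents. Because they were disregarded during the strorage procedure, the alignment between document ids and
--     indices of the list with their vector representations is now off and has to be fixed.
--
--     It's a little dirty and hack-y, but was the best solution given the time constraint.
--     """
--     empty_ids = {93688, 102435, 104040, 121863, 121866, 122113, 147904, 149905, 153512, 154467, 155654}
--     doc2repr = dict()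
--
--     zone = 1
--     for i in range(1, len(document_ids)+1):
--         if i in empty_ids:
--             zone += 1
--             continue
--
--         doc2repr[i] = i - zone
--
--     return doc2repr
-- ===== SOURCE B (Python) =====
-- def create_document_id_to_repr_map(document_ids):
--     """
--     Compensate for empty documents in document collections.
--     Same mapping as before, but each representation index is computed
--     independently as i - 1 - (number of empty ids below i), instead of
--     threading a running 'zone' accumulator through the loop.
--     """
--     empty_ids = {93688, 102435, 104040, 121863, 121866, 122113, 147904, 149905, 153512, 154467, 155654}
--     return {i: i - 1 - sum(1 for e in empty_ids if e < i)
--             for i in range(1, len(document_ids) + 1)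
--             if i not in empty_ids}
-- ===== Notes on version B (the rewrite author's own statement) =====
-- stated objective: simpler
-- what changed: Replaces the sequential loop with a running 'zone' accumulator and 'continue' by a dict comprehension that computes each index independently as i - 1 - count(empty ids below i).
import Mathlib
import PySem

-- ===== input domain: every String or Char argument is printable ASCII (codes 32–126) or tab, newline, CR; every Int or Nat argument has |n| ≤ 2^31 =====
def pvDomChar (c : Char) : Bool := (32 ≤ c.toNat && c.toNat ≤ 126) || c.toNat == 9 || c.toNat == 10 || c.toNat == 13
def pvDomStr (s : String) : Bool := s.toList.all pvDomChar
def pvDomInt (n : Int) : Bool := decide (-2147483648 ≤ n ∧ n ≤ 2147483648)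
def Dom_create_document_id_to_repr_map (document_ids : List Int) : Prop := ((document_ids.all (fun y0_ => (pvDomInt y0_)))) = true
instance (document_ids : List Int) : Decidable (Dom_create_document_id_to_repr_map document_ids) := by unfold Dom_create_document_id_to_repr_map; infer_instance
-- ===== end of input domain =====

-- B replaces A's sequential 'zone' accumulator by a comprehension computing each
-- index independently as i - 1 - count(empty ids below i); same values, no speed claim.

-- ===== PORT A =====
-- the empty-document ids (the same set literal appears in A and in B)
def pvEmptyIds : List Int :=
  [93688, 102435, 104040, 121863, 121866, 122113, 147904, 149905, 153512, 154467, 155654]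

-- the loop body of A: state (doc2repr, zone)
def pvStepA (st : PySem.Dict Int Int × Int) (i : Int) : PySem.Dict Int Int × Int :=
  if pvEmptyIds.contains i then (st.1, st.2 + 1)
  else (st.1.insert i (i - st.2), st.2)

def create_document_id_to_repr_map (document_ids : List Int) : List (Int × Int) :=
  ((PySem.List.pyRange 1 ((document_ids.length : Int) + 1) 1).foldl pvStepA
      (PySem.Dict.empty, 1)).1.items

-- ===== PORT B =====
def create_document_id_to_repr_map_alt (document_ids : List Int) : List (Int × Int) :=
  ((PySem.List.pyRange 1 ((document_ids.length : Int) + 1) 1).filter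
      (fun i => !(pvEmptyIds.contains i))).map
    (fun i => (i, i - 1 - ((pvEmptyIds.filter (fun e => decide (e < i))).length : Int)))

-- ===== PRECONDITION & SPEC =====
def Spec_create_document_id_to_repr_map (document_ids : List Int) (out : List (Int × Int)) : Prop := out = create_document_id_to_repr_map_alt document_ids
instance (document_ids : List Int) (out : List (Int × Int)) : Decidable (Spec_create_document_id_to_repr_map document_ids out) := by unfold Spec_create_document_id_to_repr_map; infer_instance

-- ===== CLAIM (what is proved, stated in full; the proofs are below) =====
def Claim_equal_create_document_id_to_repr_map : Prop := ∀ (document_ids : List Int), Dom_create_document_id_to_repr_map document_ids → Spec_create_document_id_to_repr_map document_ids (create_document_id_to_repr_map document_ids)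

-- ===== LEMMAS AND PROOFS =====

-- B's pair list for the first n document positions
def pvBPairs (n : Int) : List (Int × Int) :=
  ((PySem.List.pyRange 1 (n + 1) 1).filter (fun i => !(pvEmptyIds.contains i))).map
    (fun i => (i, i - 1 - ((pvEmptyIds.filter (fun e => decide (e < i))).length : Int)))

lemma pvEmptyIds_nodup : pvEmptyIds.Nodup := by decide

lemma count_le_succ (L : List Int) (hnd : L.Nodup) (i : Int) :
    (L.filter (fun e => decide (e ≤ i + 1))).length =
      (L.filter (fun e => decide (e ≤ i))).length + (if (i + 1) ∈ L then 1 else 0) := by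
  induction L with
  | nil => simp
  | cons a t ih =>
    simp only [List.nodup_cons] at hnd
    rw [List.filter_cons, List.filter_cons]
    by_cases ha : a = i + 1
    · subst ha
      have hnt : (i + 1) ∉ t := hnd.1
      have h1 : decide (i + 1 ≤ i + 1) = true := by simp
      have h2 : decide (i + 1 ≤ i) = false := by simp
      simp [ih hnd.2, hnt]
    · have hne : (i + 1 ∈ a :: t) ↔ (i + 1 ∈ t) := by
        constructor
        · intro h
          rcases List.mem_cons.mp h with h | h
          · exact absurd h.symm ha
          · exact h
        · exact fun h => List.mem_cons_of_mem _ h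
      by_cases hle : a ≤ i
      · have h1 : decide (a ≤ i + 1) = true := by simp; omega
        have h2 : decide (a ≤ i) = true := by simp [hle]
        simp only [h1, h2, if_true, List.length_cons, ih hnd.2, hne]
        omega
      · have h1 : decide (a ≤ i + 1) = false := by simp; omega
        have h2 : decide (a ≤ i) = false := by simp [hle]
        simp only [h1, h2, if_false, Bool.false_eq_true, ih hnd.2, hne]

lemma filter_lt_succ (L : List Int) (i : Int) :
    L.filter (fun e => decide (e < i + 1)) = L.filter (fun e => decide (e ≤ i)) := by
  apply List.filter_congr
  intro e _
  simp

lemma pvBPairs_keys_lt (n : Int) : ∀ p ∈ pvBPairs n, p.1 < n + 1 := by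
  intro p hp
  unfold pvBPairs at hp
  simp only [List.mem_map, List.mem_filter] at hp
  obtain ⟨i, ⟨hi, _⟩, rfl⟩ := hp
  exact (PySem.List.mem_pyRange_one.mp hi).2

lemma pvBPairs_succ (m : Nat) :
    pvBPairs ((m : Int) + 1) =
      pvBPairs (m : Int) ++
        (if ((m : Int) + 1) ∈ pvEmptyIds then []
         else [((m : Int) + 1,
                (m : Int) + 1 - 1 - ((pvEmptyIds.filter (fun e => decide (e < (m : Int) + 1))).length : Int))]) := by
  unfold pvBPairs
  rw [PySem.List.pyRange_one_succ_right (by omega : (1 : Int) ≤ (m : Int) + 1)]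
  rw [List.filter_append, List.map_append]
  by_cases hm : ((m : Int) + 1) ∈ pvEmptyIds
  · simp [hm]
  · simp [hm]

-- the loop invariant: after processing i = 1..m the dict holds B's pairs and
-- zone = 1 + (number of empty ids ≤ m)
lemma pvLoop_inv (m : Nat) :
    (PySem.List.pyRange 1 ((m : Int) + 1) 1).foldl pvStepA (PySem.Dict.empty, 1) =
      (PySem.Dict.mk (pvBPairs (m : Int)),
       1 + ((pvEmptyIds.filter (fun e => decide (e ≤ (m : Int)))).length : Int)) := by
  induction m with
  | zero =>
    rw [PySem.List.pyRange_one_eq_nil (by omega)]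
    simp [pvBPairs, PySem.List.pyRange_one_eq_nil]
    decide
  | succ m ih =>
    rw [show ((m + 1 : Nat) : Int) = (m : Int) + 1 by push_cast; ring]
    rw [PySem.List.pyRange_one_succ_right (by omega : (1 : Int) ≤ (m : Int) + 1)]
    rw [List.foldl_append, ih]
    simp only [List.foldl_cons, List.foldl_nil, pvStepA]
    rw [pvBPairs_succ m, count_le_succ pvEmptyIds pvEmptyIds_nodup (m : Int)]
    by_cases hm : ((m : Int) + 1) ∈ pvEmptyIds
    · have hc : pvEmptyIds.contains ((m : Int) + 1) = true := by simpa using hm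
      have hmB : ((m : Int) + 1) ∈ pvEmptyIds := hm
      simp only [hc, if_true, hm, List.append_nil]
      refine Prod.ext rfl ?_
      simp
      ring
    · have hc : pvEmptyIds.contains ((m : Int) + 1) = false := by simpa using hm
      have hmB : ((m : Int) + 1) ∉ pvEmptyIds := hm
      have hfresh : (PySem.Dict.mk (pvBPairs (m : Int))).contains ((m : Int) + 1) = false := by
        rw [PySem.Dict.contains_mk]
        simp only [List.any_eq_false]
        intro p hp
        have := pvBPairs_keys_lt (m : Int) p hp
        simp
        omega
      simp only [hc, Bool.false_eq_true, if_false, hm]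
      refine Prod.ext ?_ (by simp)
      apply PySem.Dict.ext
      rw [PySem.Dict.items_insert_of_not_contains _ _ hfresh]
      congr 1
      rw [filter_lt_succ pvEmptyIds (m : Int)]
      simp
      ring

-- ===== VERDICT (by name: the statement is the Claim_ definition above) =====
theorem create_document_id_to_repr_map_spec : Claim_equal_create_document_id_to_repr_map := by
  intro document_ids _
  unfold Spec_create_document_id_to_repr_map create_document_id_to_repr_map create_document_id_to_repr_map_alt
  rw [pvLoop_inv document_ids.length]
  rfl
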